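-- pv_equiv track=rewrite | github.com/Hagestregen/dat255-teaching-assistant | eval/compare_runs.py | _match_run
-- ===== SOURCE A (Python) =====
-- from typing import Optional
--
-- def _match_run(eval_dirname: str, run_names: list[str]) -> Optional[tuple[str, str]]:
--     """
--     Pick the *longest* run name that owns this eval result directory.
--
--     With runs named e.g. "gpt2_warm" and "gpt2_warm_v2", a directory called
--     "gpt2_warm_v2_live" must be assigned to "gpt2_warm_v2" (variant "live"),
--     not to "gpt2_warm" (variant "v2_live").
--     """
--     candidates: list[tuple[str, str]] = []  # (matched_run, variant)
--     for name in run_names: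
--         if eval_dirname == name or eval_dirname == f"run_{name}":
--             candidates.append((name, "main"))
--         elif eval_dirname.startswith(f"{name}_"):
--             candidates.append((name, eval_dirname[len(name) + 1:]))
--         elif eval_dirname.startswith(f"run_{name}_"):
--             candidates.append((name, eval_dirname[len(f"run_{name}_"):]))
--     if not candidates:
--         return None
--     # Prefer the candidate whose run name is the longest (most specific).
--     candidates.sort(key=lambda t: len(t[0]), reverse=True)
--     return candidates[0]
-- ===== SOURCE B (Python) =====
-- from typing import Optional
--
-- def _match_run(eval_dirname: str, run_names: list[str]) -> Optional[tuple[str, str]]: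
--     # Scan the run names longest-first (stable sort keeps original order among
--     # equal lengths) and return the first one that owns the directory.
--     for name in sorted(run_names, key=len, reverse=True):
--         if eval_dirname == name or eval_dirname == f"run_{name}":
--             return (name, "main")
--         if eval_dirname.startswith(f"{name}_"):
--             return (name, eval_dirname[len(name) + 1:])
--         if eval_dirname.startswith(f"run_{name}_"):
--             return (name, eval_dirname[len(f"run_{name}_"):])
--     return None
-- ===== Notes on version B (the rewrite author's own statement) =====
-- stated objective: simpler
-- what changed: B sorts the run names longest-first once and returns the candidate of the first name that matches (early exit), instead of A's building a candidate list for every name and stable-sorting the candidates at the end.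
import Mathlib
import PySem

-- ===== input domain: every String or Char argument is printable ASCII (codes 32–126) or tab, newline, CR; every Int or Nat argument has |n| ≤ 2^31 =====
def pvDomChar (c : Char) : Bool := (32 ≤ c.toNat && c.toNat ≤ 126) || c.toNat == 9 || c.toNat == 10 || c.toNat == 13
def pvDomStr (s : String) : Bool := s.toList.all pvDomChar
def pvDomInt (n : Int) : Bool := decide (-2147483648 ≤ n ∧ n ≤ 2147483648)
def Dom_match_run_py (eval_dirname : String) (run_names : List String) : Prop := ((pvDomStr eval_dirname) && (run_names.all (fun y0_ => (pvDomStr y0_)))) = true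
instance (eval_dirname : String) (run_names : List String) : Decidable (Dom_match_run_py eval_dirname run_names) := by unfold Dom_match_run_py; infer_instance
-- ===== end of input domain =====

-- B sorts the run names longest-first once and returns the first name that matches
-- (early exit), instead of A's candidate list over all names sorted at the end
-- (objective: simpler).

-- ===== PORT A =====
def match_run_py (eval_dirname : String) (run_names : List String) : Option (String × String) :=
  let candidates : List (String × String) := run_names.foldl (fun acc name =>
    if eval_dirname == name || eval_dirname == "run_" ++ name then
      acc ++ [(name, "main")]
    else if PySem.Str.startswith eval_dirname (name ++ "_") then
      acc ++ [(name, PySem.Str.slice eval_dirname (some (PySem.Str.len name + 1)) none)]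
    else if PySem.Str.startswith eval_dirname ("run_" ++ name ++ "_") then
      acc ++ [(name, PySem.Str.slice eval_dirname (some (PySem.Str.len ("run_" ++ name ++ "_"))) none)]
    else acc) []
  match PySem.List.sorted candidates (fun t => PySem.Str.len t.1) true with
  | [] => none
  | c :: _ => some c

-- ===== PORT B =====
-- the early-exit for-loop of Source B, as structural recursion over the sorted names
def firstOwner (eval_dirname : String) : List String → Option (String × String)
  | [] => none
  | name :: rest =>
    if eval_dirname == name || eval_dirname == "run_" ++ name then
      some (name, "main")
    else if PySem.Str.startswith eval_dirname (name ++ "_") then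
      some (name, PySem.Str.slice eval_dirname (some (PySem.Str.len name + 1)) none)
    else if PySem.Str.startswith eval_dirname ("run_" ++ name ++ "_") then
      some (name, PySem.Str.slice eval_dirname (some (PySem.Str.len ("run_" ++ name ++ "_"))) none)
    else firstOwner eval_dirname rest

def match_run_py_alt (eval_dirname : String) (run_names : List String) : Option (String × String) :=
  firstOwner eval_dirname (PySem.List.sorted run_names PySem.Str.len true)

-- ===== PRECONDITION & SPEC =====
def Spec_match_run_py (eval_dirname : String) (run_names : List String) (out : Option (String × String)) : Prop := out = match_run_py_alt eval_dirname run_names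
instance (eval_dirname : String) (run_names : List String) (out : Option (String × String)) : Decidable (Spec_match_run_py eval_dirname run_names out) := by unfold Spec_match_run_py; infer_instance

-- ===== CLAIM (what is proved, stated in full; the proofs are below) =====
def Claim_equal_match_run_py : Prop := ∀ (eval_dirname : String) (run_names : List String), Dom_match_run_py eval_dirname run_names → Spec_match_run_py eval_dirname run_names (match_run_py eval_dirname run_names)

-- ===== LEMMAS AND PROOFS =====

-- the candidate (if any) a single run name contributes (defeq to the branch cascade)
def candOf (eval_dirname name : String) : Option (String × String) :=
  if eval_dirname == name || eval_dirname == "run_" ++ name then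
    some (name, "main")
  else if PySem.Str.startswith eval_dirname (name ++ "_") then
    some (name, PySem.Str.slice eval_dirname (some (PySem.Str.len name + 1)) none)
  else if PySem.Str.startswith eval_dirname ("run_" ++ name ++ "_") then
    some (name, PySem.Str.slice eval_dirname (some (PySem.Str.len ("run_" ++ name ++ "_"))) none)
  else none

-- generic "first strictly-largest key" combining step
def stepKey {α : Type} (key : α → Int) (best : Option α) (c : α) : Option α :=
  match best with
  | none => some c
  | some b => if key b < key c then some c else some b

-- the same step on raw names, filtering through candOf
def stepName (d : String) (best : Option (String × String)) (name : String) :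
    Option (String × String) :=
  match candOf d name with
  | none => best
  | some c =>
    match best with
    | none => some c
    | some b => if PySem.Str.len b.1 < PySem.Str.len name then some c else some b

-- descending-by-length order on names
def DescLen (l : List String) : Prop :=
  l.Pairwise (fun a b => PySem.Str.len b ≤ PySem.Str.len a)

lemma candOf_fst {d name : String} {c : String × String} (h : candOf d name = some c) :
    c.1 = name := by
  unfold candOf at h
  split_ifs at h <;> (injection h with h; exact (congrArg Prod.fst h).symm)

-- ---- A-side: A = foldl stepKey over the candidate stream ----

lemma A_candidates (d : String) (rs : List String) (acc : List (String × String)) :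
    rs.foldl (fun acc name =>
      if d == name || d == "run_" ++ name then
        acc ++ [(name, "main")]
      else if PySem.Str.startswith d (name ++ "_") then
        acc ++ [(name, PySem.Str.slice d (some (PySem.Str.len name + 1)) none)]
      else if PySem.Str.startswith d ("run_" ++ name ++ "_") then
        acc ++ [(name, PySem.Str.slice d (some (PySem.Str.len ("run_" ++ name ++ "_"))) none)]
      else acc) acc
    = acc ++ rs.filterMap (candOf d) := by
  induction rs generalizing acc with
  | nil => simp
  | cons name rs ih =>
    rw [List.foldl_cons, ih, List.filterMap_cons]
    unfold candOf
    split_ifs <;> simp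

lemma ins_head {α : Type} (key : α → Int) (x : α) (ys : List α) :
    (PySem.List.insertBy (fun a b => decide (key b < key a)) x ys).head? =
    stepKey key ys.head? x := by
  cases ys with
  | nil => rfl
  | cons y ys =>
    simp only [PySem.List.insertBy, List.head?]
    split_ifs with h
    · simp only [stepKey, if_pos (of_decide_eq_true h)]
    · simp only [stepKey, if_neg (fun hh => h (decide_eq_true hh))]

lemma foldl_ins_head {α : Type} (key : α → Int) (cs : List α) (acc : List α) :
    (cs.foldl (fun a x => PySem.List.insertBy (fun a b => decide (key b < key a)) x a) acc).head?
    = cs.foldl (stepKey key) acc.head? := by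
  induction cs generalizing acc with
  | nil => rfl
  | cons x cs ih =>
    rw [List.foldl_cons, List.foldl_cons, ih, ins_head]

lemma sorted_head {α : Type} (key : α → Int) (cs : List α) :
    (PySem.List.sorted cs key true).head?
    = cs.foldl (stepKey key) none := by
  rw [PySem.List.sorted_rev_eq_foldl_insertBy]
  exact foldl_ins_head key cs []

lemma match_run_py_eq_fold (d : String) (rs : List String) :
    match_run_py d rs
    = (rs.filterMap (candOf d)).foldl (stepKey (fun t => PySem.Str.len t.1)) none := by
  unfold match_run_py
  rw [A_candidates d rs [], List.nil_append, ← sorted_head]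
  show (match PySem.List.sorted (rs.filterMap (candOf d)) (fun t => PySem.Str.len t.1) true with
        | [] => none
        | c :: _ => some c) = _
  cases PySem.List.sorted (rs.filterMap (candOf d)) (fun t => PySem.Str.len t.1) true <;> rfl

-- ---- B-side ----

lemma firstOwner_cons (d name : String) (rest : List String) :
    firstOwner d (name :: rest)
    = match candOf d name with
      | some c => some c
      | none => firstOwner d rest := by
  simp only [firstOwner]
  unfold candOf
  split_ifs <;> rfl

lemma firstOwner_mem {d : String} {l : List String} {b : String × String}
    (h : firstOwner d l = some b) : b.1 ∈ l := by
  induction l with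
  | nil => simp [firstOwner] at h
  | cons name rest ih =>
    rw [firstOwner_cons] at h
    cases hc : candOf d name with
    | none => rw [hc] at h; exact List.mem_cons_of_mem _ (ih h)
    | some c =>
      rw [hc] at h
      injection h with h; subst h
      rw [candOf_fst hc]; exact List.mem_cons_self

lemma mem_insertBy_len {x z : String} {l : List String}
    (h : z ∈ PySem.List.insertBy (fun a b => decide (PySem.Str.len b < PySem.Str.len a)) x l) :
    z = x ∨ z ∈ l := by
  induction l with
  | nil => simp [PySem.List.insertBy] at h; exact Or.inl h
  | cons y l ih =>
    simp only [PySem.List.insertBy] at h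
    split_ifs at h
    · rcases List.mem_cons.mp h with h1 | h2
      · exact Or.inl h1
      · exact Or.inr h2
    · rcases List.mem_cons.mp h with h1 | h2
      · exact Or.inr (h1 ▸ List.mem_cons_self)
      · rcases ih h2 with h3 | h4
        · exact Or.inl h3
        · exact Or.inr (List.mem_cons_of_mem _ h4)

lemma insertBy_descLen (x : String) {l : List String} (h : DescLen l) :
    DescLen (PySem.List.insertBy (fun a b => decide (PySem.Str.len b < PySem.Str.len a)) x l) := by
  induction l with
  | nil => simp [PySem.List.insertBy, DescLen]
  | cons y l ih =>
    have hy := (List.pairwise_cons.mp h).1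
    have hl := (List.pairwise_cons.mp h).2
    simp only [PySem.List.insertBy]
    split_ifs with hcmp
    · have hxy : PySem.Str.len y < PySem.Str.len x := of_decide_eq_true hcmp
      refine List.pairwise_cons.mpr ⟨?_, h⟩
      intro z hz
      rcases List.mem_cons.mp hz with h1 | h2
      · subst h1; omega
      · have := hy z h2; omega
    · have hxy : ¬ PySem.Str.len y < PySem.Str.len x := fun hh => hcmp (decide_eq_true hh)
      refine List.pairwise_cons.mpr ⟨?_, ih hl⟩
      intro z hz
      rcases mem_insertBy_len hz with h1 | h2
      · subst h1; omega
      · exact hy z h2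

lemma firstOwner_insertBy (d x : String) {l : List String} (h : DescLen l) :
    firstOwner d (PySem.List.insertBy (fun a b => decide (PySem.Str.len b < PySem.Str.len a)) x l)
    = stepName d (firstOwner d l) x := by
  induction l with
  | nil =>
    show firstOwner d [x] = stepName d none x
    rw [show firstOwner d [x] = _ from firstOwner_cons d x []]
    unfold stepName
    cases candOf d x <;> rfl
  | cons y l ih =>
    have hy := (List.pairwise_cons.mp h).1
    have hl := (List.pairwise_cons.mp h).2
    simp only [PySem.List.insertBy]
    split_ifs with hcmp
    · -- x goes in front: x :: y :: l
      have hxy : PySem.Str.len y < PySem.Str.len x := of_decide_eq_true hcmp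
      rw [firstOwner_cons]
      cases hc : candOf d x with
      | none => simp only [stepName, hc]
      | some c =>
        simp only [stepName, hc]
        cases hb : firstOwner d (y :: l) with
        | none => rfl
        | some b =>
          have hmem := firstOwner_mem hb
          have hble : PySem.Str.len b.1 ≤ PySem.Str.len y := by
            rcases List.mem_cons.mp hmem with h1 | h2
            · rw [h1]
            · exact hy _ h2
          show some c = if PySem.Str.len b.1 < PySem.Str.len x then some c else some b
          rw [if_pos (by omega)]
    · -- y stays in front: y :: insertBy x l
      have hxy : ¬ PySem.Str.len y < PySem.Str.len x := fun hh => hcmp (decide_eq_true hh)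
      rw [firstOwner_cons, firstOwner_cons]
      cases hcy : candOf d y with
      | none =>
        exact ih hl
      | some cy =>
        cases hc : candOf d x with
        | none => simp only [stepName, hc]
        | some c =>
          simp only [stepName, hc]
          rw [if_neg (by rw [candOf_fst hcy]; omega)]

lemma firstOwner_foldl (d : String) (xs : List String) {acc : List String} (h : DescLen acc) :
    firstOwner d (xs.foldl (fun a x =>
      PySem.List.insertBy (fun a b => decide (PySem.Str.len b < PySem.Str.len a)) x a) acc)
    = xs.foldl (stepName d) (firstOwner d acc) := by
  induction xs generalizing acc with
  | nil => rfl
  | cons x xs ih =>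
    rw [List.foldl_cons, List.foldl_cons, ih (insertBy_descLen x h), firstOwner_insertBy d x h]

lemma alt_eq_fold_names (d : String) (rs : List String) :
    match_run_py_alt d rs = rs.foldl (stepName d) none := by
  unfold match_run_py_alt
  rw [PySem.List.sorted_rev_eq_foldl_insertBy]
  exact firstOwner_foldl d rs (by simp [DescLen])

lemma fold_names_eq_fold_cands (d : String) (rs : List String)
    (best : Option (String × String)) :
    rs.foldl (stepName d) best
    = (rs.filterMap (candOf d)).foldl (stepKey (fun t => PySem.Str.len t.1)) best := by
  induction rs generalizing best with
  | nil => rfl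
  | cons name rs ih =>
    rw [List.foldl_cons, List.filterMap_cons]
    cases hc : candOf d name with
    | none => simp only [stepName, hc]; exact ih best
    | some c =>
      have hc1 : c.1 = name := candOf_fst hc
      have hstep : stepName d best name = stepKey (fun t => PySem.Str.len t.1) best c := by
        simp only [stepName, stepKey, hc, hc1]
        cases best <;> rfl

      rw [hstep, List.foldl_cons]
      exact ih _

-- ===== VERDICT (by name: the statement is the Claim_ definition above) =====
theorem match_run_py_spec : Claim_equal_match_run_py := by
  intro d rs _
  unfold Spec_match_run_py
  rw [match_run_py_eq_fold, alt_eq_fold_names, fold_names_eq_fold_cands]
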